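-- pv_equiv track=rewrite | github.com/julien-rsbrg/Acoustic-Pollution | aco.py | find_possible_nodes
-- ===== SOURCE A (Python) =====
-- def find_possible_nodes(boundary_coords, chosen_coords):
--     res = []
--     for k, coord in enumerate(boundary_coords):
--         i, j = coord
--
--         if (
--             belongs((i + 1, j), chosen_coords)
--             or belongs((i - 1, j), chosen_coords)
--             or belongs((i, j - 1), chosen_coords)
--             or belongs((i, j + 1), chosen_coords)
--         ) and (not belongs(coord, chosen_coords)):
--             res.append(k)
--
--     return res
--
-- def belongs(x, nparr):
--     for y in nparr:
--         if x[0] == y[0] and x[1] == y[1]: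
--             return True
--     return False
-- ===== SOURCE B (Python) =====
-- def find_possible_nodes(boundary_coords, chosen_coords):
--     chosen = {(c[0], c[1]) for c in chosen_coords}
--     frontier = set()
--     for c in chosen_coords:
--         i, j = c[0], c[1]
--         frontier.update(((i + 1, j), (i - 1, j), (i, j - 1), (i, j + 1)))
--     return [k for k, c in enumerate(boundary_coords)
--             if (c[0], c[1]) in frontier and (c[0], c[1]) not in chosen]
-- ===== Notes on version B (the rewrite author's own statement) =====
-- stated objective: faster
-- what changed: Precompute the chosen set and a frontier set of all orthogonal neighbors of chosen coords once, then make a single membership-test pass over boundary_coords, instead of probing four neighbors with a linear scan of chosen_coords per boundary node.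
import Mathlib
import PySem

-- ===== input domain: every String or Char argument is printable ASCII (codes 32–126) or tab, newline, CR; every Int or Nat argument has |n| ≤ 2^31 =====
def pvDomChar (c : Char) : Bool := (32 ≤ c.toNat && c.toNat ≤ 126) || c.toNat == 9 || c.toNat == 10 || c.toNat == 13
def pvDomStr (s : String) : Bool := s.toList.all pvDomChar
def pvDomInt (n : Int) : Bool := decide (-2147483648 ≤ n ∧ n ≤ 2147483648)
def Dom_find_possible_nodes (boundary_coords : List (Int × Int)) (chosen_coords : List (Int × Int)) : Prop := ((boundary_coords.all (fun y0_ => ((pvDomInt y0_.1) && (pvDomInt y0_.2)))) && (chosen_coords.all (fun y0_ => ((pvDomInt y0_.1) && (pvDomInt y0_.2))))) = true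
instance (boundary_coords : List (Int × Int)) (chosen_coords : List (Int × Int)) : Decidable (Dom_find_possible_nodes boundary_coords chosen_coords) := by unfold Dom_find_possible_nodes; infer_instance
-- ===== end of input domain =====

-- ===== PORT A =====
-- B replaces per-node linear scans of chosen_coords with precomputed chosen/frontier sets and one pass (objective: faster).
-- helper: Python `belongs`
def belongs (x : Int × Int) (nparr : List (Int × Int)) : Bool :=
  match nparr with
  | [] => false
  | y :: rest => if x.1 == y.1 && x.2 == y.2 then true else belongs x rest

def find_possible_nodes (boundary_coords : List (Int × Int)) (chosen_coords : List (Int × Int)) : List Int :=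
  (PySem.List.enumerate boundary_coords 0).foldl
    (fun res kc =>
      let i := kc.2.1
      let j := kc.2.2
      if (belongs (i + 1, j) chosen_coords || belongs (i - 1, j) chosen_coords
          || belongs (i, j - 1) chosen_coords || belongs (i, j + 1) chosen_coords)
         && !(belongs kc.2 chosen_coords)
      then res ++ [kc.1] else res) []

-- ===== PORT B =====
def find_possible_nodes_alt (boundary_coords : List (Int × Int)) (chosen_coords : List (Int × Int)) : List Int :=
  let chosen : PySem.Set (Int × Int) := PySem.Set.ofList chosen_coords
  let frontier : PySem.Set (Int × Int) := chosen_coords.foldl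
    (fun s c => PySem.Set.update s [(c.1 + 1, c.2), (c.1 - 1, c.2), (c.1, c.2 - 1), (c.1, c.2 + 1)])
    PySem.Set.empty
  (PySem.List.enumerate boundary_coords 0).filterMap
    (fun kc => if PySem.Set.contains frontier kc.2 && !(PySem.Set.contains chosen kc.2)
               then some kc.1 else none)

-- ===== PRECONDITION & SPEC =====
def Spec_find_possible_nodes (boundary_coords : List (Int × Int)) (chosen_coords : List (Int × Int)) (out : List Int) : Prop := out = find_possible_nodes_alt boundary_coords chosen_coords
instance (boundary_coords : List (Int × Int)) (chosen_coords : List (Int × Int)) (out : List Int) : Decidable (Spec_find_possible_nodes boundary_coords chosen_coords out) := by unfold Spec_find_possible_nodes; infer_instance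

-- ===== CLAIM (what is proved, stated in full; the proofs are below) =====
def Claim_equal_find_possible_nodes : Prop := ∀ (boundary_coords : List (Int × Int)) (chosen_coords : List (Int × Int)), Dom_find_possible_nodes boundary_coords chosen_coords → Spec_find_possible_nodes boundary_coords chosen_coords (find_possible_nodes boundary_coords chosen_coords)

-- ===== LEMMAS AND PROOFS =====

theorem belongs_iff (x : Int × Int) (l : List (Int × Int)) : belongs x l = true ↔ x ∈ l := by
  induction l with
  | nil => simp [belongs]
  | cons y ys ih =>
    simp only [belongs, List.mem_cons]
    split_ifs with h
    · simp only [true_iff]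
      left
      cases x; cases y
      simp only [Bool.and_eq_true, beq_iff_eq] at h
      simp [h.1, h.2]
    · rw [ih]
      constructor
      · exact Or.inr
      · rintro (rfl | hm)
        · exact absurd (by simp) h
        · exact hm

theorem mem_foldl_update {α β : Type} [BEq β] [LawfulBEq β] (f : α → List β)
    (l : List α) (s : PySem.Set β) (y : β) :
    (y ∈ l.foldl (fun s c => PySem.Set.update s (f c)) s) ↔ y ∈ s ∨ ∃ c ∈ l, y ∈ f c := by
  induction l generalizing s with
  | nil => simp
  | cons c cs ih =>
    simp only [List.foldl_cons, ih, PySem.Set.mem_update, List.mem_cons]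
    constructor
    · rintro ((h | h) | ⟨c', hc', hy⟩)
      · exact Or.inl h
      · exact Or.inr ⟨c, Or.inl rfl, h⟩
      · exact Or.inr ⟨c', Or.inr hc', hy⟩
    · rintro (h | ⟨c', (rfl | hc'), hy⟩)
      · exact Or.inl (Or.inl h)
      · exact Or.inl (Or.inr hy)
      · exact Or.inr ⟨c', hc', hy⟩

theorem filterMap_if_eq_filter_map {α β : Type} (p : α → Bool) (f : α → β) (l : List α) :
    l.filterMap (fun x => if p x then some (f x) else none) = (l.filter p).map f := by
  induction l with
  | nil => rfl
  | cons x xs ih =>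
    by_cases h : p x <;> simp [h, ih]

theorem contains_frontier_eq (cc : List (Int × Int)) (c : Int × Int) :
    PySem.Set.contains
      (cc.foldl (fun s c =>
        PySem.Set.update s [(c.1 + 1, c.2), (c.1 - 1, c.2), (c.1, c.2 - 1), (c.1, c.2 + 1)])
        PySem.Set.empty) c
    = (belongs (c.1 + 1, c.2) cc || belongs (c.1 - 1, c.2) cc
        || belongs (c.1, c.2 - 1) cc || belongs (c.1, c.2 + 1) cc) := by
  obtain ⟨u, v⟩ := c
  rw [Bool.eq_iff_iff]
  rw [PySem.Set.contains_iff,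
      mem_foldl_update (fun d : Int × Int => [(d.1 + 1, d.2), (d.1 - 1, d.2), (d.1, d.2 - 1), (d.1, d.2 + 1)])]
  simp only [Bool.or_eq_true, belongs_iff, PySem.Set.empty, List.not_mem_nil, false_or,
    List.mem_cons, or_false]
  constructor
  · rintro ⟨⟨a, b⟩, hd, h⟩
    simp only [Prod.mk.injEq] at h
    rcases h with ⟨h1, h2⟩ | ⟨h1, h2⟩ | ⟨h1, h2⟩ | ⟨h1, h2⟩
    · refine Or.inl (Or.inl (Or.inr ?_))
      have : ((u : Int) - 1, (v : Int)) = ((a : Int), (b : Int)) := by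
        simp only [Prod.mk.injEq]; omega
      exact this ▸ hd
    · refine Or.inl (Or.inl (Or.inl ?_))
      have : ((u : Int) + 1, (v : Int)) = ((a : Int), (b : Int)) := by
        simp only [Prod.mk.injEq]; omega
      exact this ▸ hd
    · refine Or.inr ?_
      have : ((u : Int), (v : Int) + 1) = ((a : Int), (b : Int)) := by
        simp only [Prod.mk.injEq]; omega
      exact this ▸ hd
    · refine Or.inl (Or.inr ?_)
      have : ((u : Int), (v : Int) - 1) = ((a : Int), (b : Int)) := by
        simp only [Prod.mk.injEq]; omega
      exact this ▸ hd
  · rintro (((h | h) | h) | h)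
    · exact ⟨(u + 1, v), h, Or.inr (Or.inl (by simp))⟩
    · exact ⟨(u - 1, v), h, Or.inl (by simp)⟩
    · exact ⟨(u, v - 1), h, Or.inr (Or.inr (Or.inr (by simp)))⟩
    · exact ⟨(u, v + 1), h, Or.inr (Or.inr (Or.inl (by simp)))⟩

theorem contains_chosen_eq (cc : List (Int × Int)) (c : Int × Int) :
    PySem.Set.contains (PySem.Set.ofList cc) c = belongs c cc := by
  rw [Bool.eq_iff_iff, PySem.Set.contains_iff, PySem.Set.mem_ofList, belongs_iff]

-- ===== VERDICT (by name: the statement is the Claim_ definition above) =====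
theorem find_possible_nodes_spec : Claim_equal_find_possible_nodes := by
  intro bc cc _
  unfold Spec_find_possible_nodes find_possible_nodes find_possible_nodes_alt
  rw [PySem.List.foldl_append_if
        (p := fun kc : Int × (Int × Int) =>
          (belongs (kc.2.1 + 1, kc.2.2) cc || belongs (kc.2.1 - 1, kc.2.2) cc
            || belongs (kc.2.1, kc.2.2 - 1) cc || belongs (kc.2.1, kc.2.2 + 1) cc)
          && !(belongs kc.2 cc))
        (f := fun kc : Int × (Int × Int) => kc.1),
      filterMap_if_eq_filter_map]
  simp only [List.nil_append]
  congr 1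
  apply List.filter_congr
  intro kc _
  rw [contains_frontier_eq, contains_chosen_eq]
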